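-- pv_equiv track=rewrite | github.com/mishidemudong/mudong_leetcode | 最长递增子序列长度.py | lengthOfLISbao
-- ===== SOURCE A (Python) =====
-- def lengthOfLISbao(nums):
--
--     if len(set(nums)) == 1:
--         return 1
--
--     result = []
--
--     for i in range(len(nums)):
--         tmp = [nums[i]]
--         index = 0
--         for j in range(i + 1, len(nums)):
--
--             if nums[j] >= tmp[index]:
--                 tmp.append(nums[j])
--                 index += 1
--         result.append(len(tmp))
--
--     return max(result)
-- ===== SOURCE B (Python) =====
-- def lengthOfLISbao(nums):
--     if len(set(nums)) == 1:
--         return 1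
--     best = 0
--     stack = []  # pairs (value, greedy-chain length starting at that element); top at the end
--     for x in reversed(nums):
--         while stack and stack[-1][0] < x:
--             stack.pop()
--         f = 1 + stack[-1][1] if stack else 1
--         if best < f:
--             best = f
--         stack.append((x, f))
--     return best
-- ===== Notes on version B (the rewrite author's own statement) =====
-- stated objective: faster
-- what changed: A re-runs the greedy >=-chain from every start index (nested loops); B scans once right-to-left with a monotonic stack that yields each start's chain length as 1 + chain length at its nearest following element that is >= it, keeping a running maximum.
import Mathlib
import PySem

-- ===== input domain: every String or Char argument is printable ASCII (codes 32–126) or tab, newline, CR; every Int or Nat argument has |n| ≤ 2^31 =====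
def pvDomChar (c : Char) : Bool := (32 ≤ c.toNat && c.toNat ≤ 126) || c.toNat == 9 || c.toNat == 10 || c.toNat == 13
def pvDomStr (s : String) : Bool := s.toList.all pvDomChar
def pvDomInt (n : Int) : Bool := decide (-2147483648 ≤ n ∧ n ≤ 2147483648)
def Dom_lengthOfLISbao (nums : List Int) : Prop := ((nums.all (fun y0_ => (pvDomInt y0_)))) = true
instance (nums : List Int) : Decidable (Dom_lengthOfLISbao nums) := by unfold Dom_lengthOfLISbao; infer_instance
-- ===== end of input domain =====

-- B replaces A's per-start re-runs of the greedy chain by one right-to-left monotonic-stack pass (objective: faster, measured).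

-- ===== PORT A =====
def lengthOfLISbao (nums : List Int) : Int :=
  if PySem.Set.len (PySem.Set.ofList nums) = 1 then 1
  else
    let result : List Int :=
      (PySem.List.pyRange 0 (PySem.List.len nums) 1).foldl
        (fun result i =>
          result ++
            [((((PySem.List.pyRange (i + 1) (PySem.List.len nums) 1).foldl
                  (fun (st : List Int × Int) j =>
                    if PySem.List.pyGetD st.1 st.2 0 ≤ PySem.List.pyGetD nums j 0 then
                      (st.1 ++ [PySem.List.pyGetD nums j 0], st.2 + 1)
                    else st)
                  ([PySem.List.pyGetD nums i 0], 0)).1.length : Int))])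
        []
    -- max([]) raises ValueError: nums = [] is excluded by Pre_lengthOfLISbao
    (PySem.List.max? result (fun x => x)).getD 0

-- ===== PORT B =====
def lengthOfLISbao_alt (nums : List Int) : Int :=
  if PySem.Set.len (PySem.Set.ofList nums) = 1 then 1
  else
    (nums.reverse.foldl
      (fun (st : Int × List (Int × Int)) x =>
        -- stack top is the list HEAD here; 'while stack and stack[-1][0] < x: stack.pop()' is dropWhile
        let stack := st.2.dropWhile (fun p => decide (p.1 < x))
        let f : Int := match stack with | [] => 1 | p :: _ => 1 + p.2
        (if st.1 < f then f else st.1, (x, f) :: stack))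
      (0, [])).1

-- ===== PRECONDITION & SPEC =====
-- Pre_ excludes only the empty list, on which A raises ValueError (max() of an empty sequence).
def Pre_lengthOfLISbao (nums : List Int) : Prop := nums ≠ []
instance (nums : List Int) : Decidable (Pre_lengthOfLISbao nums) := by unfold Pre_lengthOfLISbao; infer_instance
def pvWitness_lengthOfLISbao : List Int := [3, 1, 2]

def Spec_lengthOfLISbao (nums : List Int) (out : Int) : Prop := out = lengthOfLISbao_alt nums
instance (nums : List Int) (out : Int) : Decidable (Spec_lengthOfLISbao nums out) := by unfold Spec_lengthOfLISbao; infer_instance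

-- ===== CLAIM (what is proved, stated in full; the proofs are below) =====
def Claim_equal_lengthOfLISbao : Prop := ∀ (nums : List Int), Dom_lengthOfLISbao nums → Pre_lengthOfLISbao nums → Spec_lengthOfLISbao nums (lengthOfLISbao nums)

-- ===== LEMMAS AND PROOFS =====

-- length of the greedy non-decreasing chain continuing from last value x through the list
def gchain : Int → List Int → Int
  | _, [] => 0
  | x, y :: t => if x ≤ y then 1 + gchain y t else gchain x t

-- the chain lengths A collects, one per start position, in order
def allChains : List Int → List Int
  | [] => []
  | y :: t => (1 + gchain y t) :: allChains t

-- A's inner-loop body as a function of the state and the current element nums[j]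
def stepA (st : List Int × Int) (v : Int) : List Int × Int :=
  if PySem.List.pyGetD st.1 st.2 0 ≤ v then (st.1 ++ [v], st.2 + 1) else st

-- B's loop body
def stepB (st : Int × List (Int × Int)) (x : Int) : Int × List (Int × Int) :=
  let stack := st.2.dropWhile (fun p => decide (p.1 < x))
  let f : Int := match stack with | [] => 1 | p :: _ => 1 + p.2
  (if st.1 < f then f else st.1, (x, f) :: stack)

lemma gchain_nonneg (x : Int) (l : List Int) : 0 ≤ gchain x l := by
  induction l generalizing x with
  | nil => simp [gchain]
  | cons y t ih => simp only [gchain]; split <;> [linarith [ih y]; exact ih x]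

lemma pyGetD_last (l : List Int) (h : l ≠ []) :
    PySem.List.pyGetD l ((l.length : Int) - 1) 0 = l.getLast h := by
  have hl : 0 < l.length := List.length_pos_iff.mpr h
  rw [PySem.List.pyGetD_eq_getElem l 0 (by omega) (by omega)]
  rw [List.getLast_eq_getElem]
  congr 1
  omega

-- A's inner loop over the remaining list s extends tmp by exactly gchain (last tmp) s elements
lemma innerA (s : List Int) : ∀ (tmp : List Int) (h : tmp ≠ []),
    (((s.foldl stepA (tmp, (tmp.length : Int) - 1)).1.length : Int)) =
      tmp.length + gchain (tmp.getLast h) s := by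
  induction s with
  | nil => intro tmp h; simp [gchain]
  | cons y s ih =>
    intro tmp h
    rw [List.foldl_cons]
    have hlast := pyGetD_last tmp h
    by_cases hc : tmp.getLast h ≤ y
    · have hstep : stepA (tmp, (tmp.length : Int) - 1) y = (tmp ++ [y], (tmp.length : Int)) := by
        simp [stepA, hlast, hc]
      rw [hstep]
      have h2 : (tmp ++ [y]) ≠ [] := by simp
      have hlen : ((tmp ++ [y]).length : Int) - 1 = (tmp.length : Int) := by simp
      have hih := ih (tmp ++ [y]) h2
      rw [hlen] at hih
      rw [hih]
      have hl2 : (tmp ++ [y]).getLast h2 = y := by simp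
      rw [hl2]
      simp [gchain, hc]
      ring
    · have hstep : stepA (tmp, (tmp.length : Int) - 1) y = (tmp, (tmp.length : Int) - 1) := by
        simp [stepA, hlast, hc]
      rw [hstep, ih tmp h]
      simp [gchain, hc]

lemma allChains_length (l : List Int) : (allChains l).length = l.length := by
  induction l with
  | nil => rfl
  | cons y t ih => simp [allChains, ih]

lemma allChains_getElem (l : List Int) (k : Nat) (h : k < l.length) :
    (allChains l)[k]'(by rw [allChains_length]; exact h) =
      1 + gchain (l[k]'h) (l.drop (k + 1)) := by
  induction l generalizing k with
  | nil => simp at h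
  | cons y t ih =>
    cases k with
    | zero => simp [allChains]
    | succ k => simpa [allChains] using ih k (by simpa using h)

-- A's result list is exactly allChains nums
lemma resultA (nums : List Int) :
    (PySem.List.pyRange 0 (PySem.List.len nums) 1).map
      (fun i =>
        ((((PySem.List.pyRange (i + 1) (PySem.List.len nums) 1).foldl
              (fun (st : List Int × Int) j =>
                if PySem.List.pyGetD st.1 st.2 0 ≤ PySem.List.pyGetD nums j 0 then
                  (st.1 ++ [PySem.List.pyGetD nums j 0], st.2 + 1)
                else st)
              ([PySem.List.pyGetD nums i 0], 0)).1.length : Int)))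
      = allChains nums := by
  apply List.ext_getElem
  · simp [PySem.List.length_pyRange_one, allChains_length, PySem.List.len]
  · intro k h1 h2
    rw [List.getElem_map]
    rw [PySem.List.getElem_pyRange_one]
    have hk : k < nums.length := by
      simpa [allChains_length] using h2
    have hinner :
        (fun (st : List Int × Int) j =>
          if PySem.List.pyGetD st.1 st.2 0 ≤ PySem.List.pyGetD nums j 0 then
            (st.1 ++ [PySem.List.pyGetD nums j 0], st.2 + 1)
          else st) = fun st j => stepA st (PySem.List.pyGetD nums j 0) := rfl
    rw [hinner, PySem.List.foldl_pyRange_pyGetD nums 0 stepA _ (by omega : (0:Int) ≤ 0 + (k:Int) + 1)]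
    have h0 : ((0:Int) + k + 1).toNat = k + 1 := by omega
    rw [h0]
    have hv : PySem.List.pyGetD nums (0 + (k:Int)) 0 = nums[k] := by
      rw [show (0 + (k:Int)) = ((k:Int)) by ring, PySem.List.pyGetD_natCast]
      exact List.getD_eq_getElem nums 0 hk
    rw [hv]
    have hne : ([nums[k]] : List Int) ≠ [] := by simp
    have hin := innerA (nums.drop (k+1)) [nums[k]] hne
    simp only [List.length_cons, List.length_nil, List.getLast_singleton] at hin
    rw [show ((1:Nat) : Int) - 1 = 0 by ring] at hin
    rw [hin, allChains_getElem nums k hk]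
    push_cast
    ring

lemma dropWhile_dropWhile (l : List (Int × Int)) (y x : Int) (h : y < x) :
    (l.dropWhile (fun p => decide (p.1 < y))).dropWhile (fun p => decide (p.1 < x)) =
      l.dropWhile (fun p => decide (p.1 < x)) := by
  induction l with
  | nil => rfl
  | cons p l ih =>
    by_cases hp : p.1 < y
    · rw [List.dropWhile_cons_of_pos (by simpa using hp), ih,
        List.dropWhile_cons_of_pos (by simp; omega)]
    · rw [List.dropWhile_cons_of_neg (by simpa using hp)]

-- the stack invariant: popping to the first entry ≥ x reads off gchain x t
def goodStack (t : List Int) (stack : List (Int × Int)) : Prop :=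
  ∀ x : Int, (((stack.dropWhile (fun p => decide (p.1 < x))).head?.map Prod.snd).getD 0) = gchain x t

lemma foldrB (t : List Int) :
    goodStack t ((t.foldr (fun x st => stepB st x) ((0 : Int), ([] : List (Int × Int)))).2) ∧
      (t.foldr (fun x st => stepB st x) ((0 : Int), ([] : List (Int × Int)))).1 =
        (allChains t).foldr max 0 := by
  induction t with
  | nil =>
    constructor
    · intro x; simp [gchain]
    · simp [allChains]
  | cons y t ih =>
    obtain ⟨hgs, hbest⟩ := ih
    rw [List.foldr_cons]
    set st := t.foldr (fun x st => stepB st x) ((0 : Int), ([] : List (Int × Int))) with hst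
    have hf : (match st.2.dropWhile (fun p => decide (p.1 < y)) with
        | [] => (1:Int) | p :: _ => 1 + p.2) = 1 + gchain y t := by
      have hy := hgs y
      cases hd : st.2.dropWhile (fun p => decide (p.1 < y)) with
      | nil => rw [hd] at hy; simp at hy; simp [← hy]
      | cons p l => rw [hd] at hy; simp at hy; simp [← hy]
    constructor
    · intro x
      simp only [stepB, hf]
      by_cases hxy : x ≤ y
      · rw [List.dropWhile_cons_of_neg (by simp; omega)]
        simp [gchain, hxy]
      · rw [List.dropWhile_cons_of_pos (by simp; omega)]
        rw [dropWhile_dropWhile _ _ _ (by omega)]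
        rw [hgs x]
        simp [gchain, hxy]
    · simp only [stepB, hf, allChains, List.foldr_cons]
      rw [hbest]
      rcases le_or_gt (1 + gchain y t) ((allChains t).foldr max 0) with hle | hgt
      · rw [if_neg (by omega), max_eq_right hle]
      · rw [if_pos (by omega), max_eq_left (by omega)]

lemma foldl_max_eq_foldr (t : List Int) : ∀ x : Int, 0 ≤ x →
    t.foldl max x = max x (t.foldr max 0) := by
  induction t with
  | nil => intro x hx; simp [max_eq_left hx]
  | cons y t ih =>
    intro x hx
    simp only [List.foldl_cons, List.foldr_cons]
    rw [ih (max x y) (le_trans hx (le_max_left x y)), max_assoc]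

lemma B_eq (nums : List Int) : lengthOfLISbao_alt nums =
    if PySem.Set.len (PySem.Set.ofList nums) = 1 then 1 else (allChains nums).foldr max 0 := by
  unfold lengthOfLISbao_alt
  split_ifs with hset
  · rfl
  · have h1 : (fun (st : Int × List (Int × Int)) x =>
        let stack := st.2.dropWhile (fun p => decide (p.1 < x))
        let f : Int := match stack with | [] => 1 | p :: _ => 1 + p.2
        (if st.1 < f then f else st.1, (x, f) :: stack)) = fun st x => stepB st x := rfl
    rw [h1, List.foldl_reverse]
    exact (foldrB nums).2

lemma A_eq (nums : List Int) (h : nums ≠ []) : lengthOfLISbao nums =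
    if PySem.Set.len (PySem.Set.ofList nums) = 1 then 1 else (allChains nums).foldr max 0 := by
  unfold lengthOfLISbao
  split_ifs with hset
  · rfl
  · rw [PySem.List.foldl_append_singleton_eq_map
      (fun i =>
        ((((PySem.List.pyRange (i + 1) (PySem.List.len nums) 1).foldl
              (fun (st : List Int × Int) j =>
                if PySem.List.pyGetD st.1 st.2 0 ≤ PySem.List.pyGetD nums j 0 then
                  (st.1 ++ [PySem.List.pyGetD nums j 0], st.2 + 1)
                else st)
              ([PySem.List.pyGetD nums i 0], 0)).1.length : Int))), List.nil_append, resultA]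
    cases nums with
    | nil => exact absurd rfl h
    | cons y t =>
      show (PySem.List.max? ((1 + gchain y t) :: allChains t) (fun x => x)).getD 0 = _
      rw [PySem.List.max?_id_cons, Option.getD_some,
        foldl_max_eq_foldr (allChains t) (1 + gchain y t) (by linarith [gchain_nonneg y t])]
      rfl

-- ===== VERDICT (by name: the statement is the Claim_ definition above) =====
theorem lengthOfLISbao_spec : Claim_equal_lengthOfLISbao := by
  intro nums _ hpre
  show lengthOfLISbao nums = lengthOfLISbao_alt nums
  rw [A_eq nums hpre, B_eq nums]
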